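-- pv_equiv track=rewrite | github.com/alehdezp/alphaswarm-sol | scripts/validate_plan_consistency.py | extract_paths
-- ===== SOURCE A (Python) =====
-- def extract_paths(plan_text: str) -> tuple[list[str], list[str]]:
--     files_modified = []
--     other_paths = []
--     in_files_modified = False
--     for line in plan_text.splitlines():
--         if line.strip().startswith("files_modified:"):
--             in_files_modified = True
--             continue
--         if in_files_modified:
--             if not line.startswith("  - "):
--                 in_files_modified = False
--             else:
--                 path = line.strip()[2:].strip()
--                 files_modified.append(path)
--                 continue
--         # path: "..."
--         stripped = line.strip()
--         if stripped.startswith("path:"):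
--             value = stripped.split(":", 1)[1].strip().strip('"')
--             other_paths.append(value)
--     return files_modified, other_paths
-- ===== SOURCE B (Python) =====
-- def extract_paths(plan_text: str) -> tuple[list[str], list[str]]:
--     lines = plan_text.splitlines()
--     # Pass 1 (stateless): every line whose stripped form starts with "path:" contributes,
--     # regardless of any files_modified block (a "  - " item strips to "-...", never "path:").
--     other_paths = [
--         s.split(":", 1)[1].strip().strip('"')
--         for s in map(str.strip, lines)
--         if s.startswith("path:")
--     ]
--     # Pass 2 (block-oriented): after each "files_modified:" header, collect the contiguous
--     # "  - " items; the terminating line needs no re-examination here (pass 1 handled it).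
--     files_modified = []
--     i, n = 0, len(lines)
--     while i < n:
--         if lines[i].strip().startswith("files_modified:"):
--             i += 1
--             while i < n and lines[i].startswith("  - "):
--                 files_modified.append(lines[i].strip()[2:].strip())
--                 i += 1
--         else:
--             i += 1
--     return files_modified, other_paths
-- ===== Notes on version B (the rewrite author's own statement) =====
-- stated objective: alternative
-- what changed: Replaces A's single stateful pass (boolean flag threading both outputs) by two independent staged passes: a stateless comprehension extracting every 'path:' line, and a separate block-oriented index scan that consumes each contiguous ' - ' block after a 'files_modified:' header.
import Mathlib
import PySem

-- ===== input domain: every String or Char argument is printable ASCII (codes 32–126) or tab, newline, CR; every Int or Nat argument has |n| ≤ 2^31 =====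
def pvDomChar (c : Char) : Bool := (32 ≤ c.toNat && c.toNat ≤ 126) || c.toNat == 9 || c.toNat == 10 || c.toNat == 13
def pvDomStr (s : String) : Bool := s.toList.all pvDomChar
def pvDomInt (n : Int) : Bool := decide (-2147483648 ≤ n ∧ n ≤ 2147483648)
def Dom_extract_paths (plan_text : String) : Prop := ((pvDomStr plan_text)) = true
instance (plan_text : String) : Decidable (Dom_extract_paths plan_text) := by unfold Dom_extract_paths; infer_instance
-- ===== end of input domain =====

-- B replaces A's single stateful pass (a boolean flag threading both outputs) by two
-- independent staged passes: a stateless comprehension for the "path:" lines and a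
-- block-oriented index scan for the "files_modified:" blocks (alternative decomposition, same cost).

-- ===== PORT A =====
-- line.strip()[2:].strip()
def pvPathOf (line : String) : String :=
  PySem.Str.strip (PySem.Str.slice (PySem.Str.strip line) (some 2) none)

-- stripped.split(":", 1)[1].strip().strip('"'); inside the "path:" branch stripped contains ":",
-- so split(":",1) has two pieces and the index-1 access cannot raise (default never used)
def pvValueOf (stripped : String) : String :=
  PySem.Str.stripChars
    (PySem.Str.strip (PySem.List.pyGetD ((PySem.Str.splitMax? stripped ":" 1).getD []) 1 ""))
    "\""

-- the body of A's for-loop; state = (files_modified, other_paths, in_files_modified)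
def pvStepA (st : List String × List String × Bool) (line : String) :
    List String × List String × Bool :=
  let fm := st.1
  let op := st.2.1
  let flag := st.2.2
  if PySem.Str.startswith (PySem.Str.strip line) "files_modified:" then (fm, op, true)
  else if flag && PySem.Str.startswith line "  - " then (fm ++ [pvPathOf line], op, true)
  else
    -- (when flag was true we have just reset it to false and fall through to the path check)
    let stripped := PySem.Str.strip line
    if PySem.Str.startswith stripped "path:" then (fm, op ++ [pvValueOf stripped], false)
    else (fm, op, false)

def extract_paths (plan_text : String) : List String × List String :=
  let r := (PySem.Str.splitlines plan_text).foldl pvStepA ([], [], false)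
  (r.1, r.2.1)

-- ===== PORT B =====
-- pass 1: the list comprehension over the stripped lines
def pvAltPaths (lines : List String) : List String :=
  ((lines.map PySem.Str.strip).filter
      (fun s => PySem.Str.startswith s "path:")).map pvValueOf

-- the inner while loop of pass 2: consume the contiguous "  - " lines
def pvBlock (fm : List String) : List String → List String × List String
  | [] => (fm, [])
  | l :: ls =>
    if PySem.Str.startswith l "  - " then pvBlock (fm ++ [pvPathOf l]) ls
    else (fm, l :: ls)

theorem pvBlock_len (fm : List String) (ls : List String) :
    (pvBlock fm ls).2.length ≤ ls.length := by
  induction ls generalizing fm with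
  | nil => simp [pvBlock]
  | cons l ls ih =>
    simp only [pvBlock]
    split
    · exact Nat.le_succ_of_le (ih _)
    · simp

-- the outer while loop of pass 2 (over the remaining lines)
def pvLoopFM (fm : List String) (lines : List String) : List String :=
  match lines with
  | [] => fm
  | l :: ls =>
    if PySem.Str.startswith (PySem.Str.strip l) "files_modified:" then
      let p := pvBlock fm ls
      pvLoopFM p.1 p.2
    else pvLoopFM fm ls
termination_by lines.length
decreasing_by
  · exact Nat.lt_succ_of_le (pvBlock_len fm ls)
  · simp

def extract_paths_alt (plan_text : String) : List String × List String :=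
  let lines := PySem.Str.splitlines plan_text
  (pvLoopFM [] lines, pvAltPaths lines)

-- ===== PRECONDITION & SPEC =====
def Spec_extract_paths (plan_text : String) (out : List String × List String) : Prop := out = extract_paths_alt plan_text
instance (plan_text : String) (out : List String × List String) : Decidable (Spec_extract_paths plan_text out) := by unfold Spec_extract_paths; infer_instance

-- ===== CLAIM (what is proved, stated in full; the proofs are below) =====
def Claim_equal_extract_paths : Prop := ∀ (plan_text : String), Dom_extract_paths plan_text → Spec_extract_paths plan_text (extract_paths plan_text)

-- ===== LEMMAS AND PROOFS =====

-- a '-' heads the rstrip of any list it heads (a '-' is not whitespace, so rstrip keeps it)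
theorem pvRstrip_cons (t : List Char) :
    ∃ t', PySem.Chars.rstrip ('-' :: t) = '-' :: t' := by
  simp only [PySem.Chars.rstrip, List.reverse_cons, List.dropWhile_append]
  split
  · exact ⟨[], by simp [List.dropWhile, PySem.Chars.isspace]⟩
  · exact ⟨(List.dropWhile PySem.Chars.isspace t.reverse).reverse, by simp⟩

-- a line starting with "  - " strips to a string starting with '-'
theorem pvDash_strip (cs : List Char)
    (h : PySem.Chars.startswith cs [' ', ' ', '-', ' '] = true) :
    ∃ t, PySem.Chars.strip cs = '-' :: t := by
  rw [PySem.Chars.startswith_iff] at h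
  obtain ⟨r, hr⟩ := h
  have h1 : PySem.Chars.isspace ' ' = true := by decide
  have h2 : PySem.Chars.isspace '-' = false := by decide
  rw [← hr]
  simp only [List.cons_append, List.nil_append, PySem.Chars.strip, PySem.Chars.lstrip,
    List.dropWhile_cons, h1, h2]
  norm_num
  obtain ⟨t', ht'⟩ := pvRstrip_cons (' ' :: r)
  rw [ht']
  exact ⟨t', rfl⟩

-- such a stripped line never starts with "files_modified:" nor "path:"
theorem pvDash_not_fm (cs : List Char)
    (h : PySem.Chars.startswith cs [' ', ' ', '-', ' '] = true) :
    PySem.Chars.startswith (PySem.Chars.strip cs)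
      ['f', 'i', 'l', 'e', 's', '_', 'm', 'o', 'd', 'i', 'f', 'i', 'e', 'd', ':'] = false := by
  obtain ⟨t, ht⟩ := pvDash_strip cs h
  rw [ht]; simp [PySem.Chars.startswith, List.isPrefixOf]

theorem pvDash_not_path (cs : List Char)
    (h : PySem.Chars.startswith cs [' ', ' ', '-', ' '] = true) :
    PySem.Chars.startswith (PySem.Chars.strip cs) ['p', 'a', 't', 'h', ':'] = false := by
  obtain ⟨t, ht⟩ := pvDash_strip cs h
  rw [ht]; simp [PySem.Chars.startswith, List.isPrefixOf]

-- a stripped line starting with "files_modified:" never starts with "path:"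
theorem pvFm_not_path (s : List Char)
    (h : PySem.Chars.startswith s
      ['f', 'i', 'l', 'e', 's', '_', 'm', 'o', 'd', 'i', 'f', 'i', 'e', 'd', ':'] = true) :
    PySem.Chars.startswith s ['p', 'a', 't', 'h', ':'] = false := by
  rw [PySem.Chars.startswith_iff] at h
  obtain ⟨r, hr⟩ := h
  rw [← hr]
  simp [PySem.Chars.startswith, List.isPrefixOf]

-- the "  - " lines consumed by a block contribute nothing to pass 1
theorem pvAltPaths_block (fm : List String) (ls : List String) :
    pvAltPaths (pvBlock fm ls).2 = pvAltPaths ls := by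
  induction ls generalizing fm with
  | nil => simp [pvBlock]
  | cons l ls ih =>
    simp only [pvBlock]
    by_cases hd : PySem.Str.startswith l "  - " = true
    · rw [if_pos hd, ih]
      have hp := pvDash_not_path l.toList (by simpa [PySem.Str.startswith] using hd)
      simp [pvAltPaths, hp]
    · rw [if_neg hd]

-- projection of A's loop state onto the returned pair
def pvProj (st : List String × List String × Bool) : List String × List String := (st.1, st.2.1)

-- main invariant: A's fold with flag false computes B's two passes, and with flag true it
-- computes them resumed after the inner block consumption
theorem pvMain : ∀ (n : Nat) (ls : List String), ls.length ≤ n → ∀ fm op,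
    (pvProj (List.foldl pvStepA (fm, op, false) ls) = (pvLoopFM fm ls, op ++ pvAltPaths ls)) ∧
    (pvProj (List.foldl pvStepA (fm, op, true) ls) =
      (pvLoopFM (pvBlock fm ls).1 (pvBlock fm ls).2, op ++ pvAltPaths (pvBlock fm ls).2)) := by
  intro n
  induction n with
  | zero =>
    intro ls hls fm op
    have : ls = [] := List.length_eq_zero_iff.mp (Nat.le_zero.mp hls)
    subst this
    simp [pvLoopFM, pvBlock, pvProj, pvAltPaths]
  | succ n ih =>
    intro ls hls fm op
    match ls with
    | [] => simp [pvLoopFM, pvBlock, pvProj, pvAltPaths]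
    | l :: ls =>
      have hlen : ls.length ≤ n := by simpa using Nat.lt_succ_iff.mp (Nat.lt_of_lt_of_le (by simp) hls)
      by_cases hfm : PySem.Chars.startswith (PySem.Chars.strip l.toList)
          ['f', 'i', 'l', 'e', 's', '_', 'm', 'o', 'd', 'i', 'f', 'i', 'e', 'd', ':'] = true
      · have hp : PySem.Chars.startswith (PySem.Chars.strip l.toList)
            ['p', 'a', 't', 'h', ':'] = false := pvFm_not_path _ hfm
        constructor
        · -- flag false, header line: A sets the flag; B's pass 2 enters the block
          rw [List.foldl_cons]
          have hstep : pvStepA (fm, op, false) l = (fm, op, true) := by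
            simp [pvStepA, hfm]
          rw [hstep, (ih ls hlen fm op).2]
          conv_rhs => rw [pvLoopFM]
          rw [if_pos (by simpa using hfm), pvAltPaths_block]
          simp [pvAltPaths, hp]
        · -- flag true, header line: not a "  - " line (pvDash_not_fm), A keeps the flag
          have hdash : PySem.Chars.startswith l.toList [' ', ' ', '-', ' '] = false := by
            by_contra hc
            have := pvDash_not_fm l.toList
              (by revert hc; cases PySem.Chars.startswith l.toList [' ', ' ', '-', ' '] <;> simp)
            rw [this] at hfm; exact Bool.false_ne_true hfm
          rw [List.foldl_cons]
          have hstep : pvStepA (fm, op, true) l = (fm, op, true) := by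
            simp [pvStepA, hfm]
          rw [hstep, (ih ls hlen fm op).2]
          conv_rhs => rw [pvBlock]
          rw [if_neg (by simp [hdash])]
          conv_rhs => rw [pvLoopFM]
          rw [if_pos (by simpa using hfm), pvAltPaths_block]
          simp [pvAltPaths, hp]
      · have hfm' : PySem.Chars.startswith (PySem.Chars.strip l.toList)
            ['f', 'i', 'l', 'e', 's', '_', 'm', 'o', 'd', 'i', 'f', 'i', 'e', 'd', ':'] = false := by
          revert hfm; cases PySem.Chars.startswith (PySem.Chars.strip l.toList)
            ['f', 'i', 'l', 'e', 's', '_', 'm', 'o', 'd', 'i', 'f', 'i', 'e', 'd', ':'] <;> simp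
        by_cases hp : PySem.Chars.startswith (PySem.Chars.strip l.toList)
            ['p', 'a', 't', 'h', ':'] = true
        · constructor
          · rw [List.foldl_cons]
            have hstep : pvStepA (fm, op, false) l =
                (fm, op ++ [pvValueOf (PySem.Str.strip l)], false) := by
              simp [pvStepA, hfm', hp]
            rw [hstep, (ih ls hlen fm _).1]
            conv_rhs => rw [pvLoopFM]
            rw [if_neg (by simp [hfm'])]
            simp [pvAltPaths, hp]
          · by_cases hdash : PySem.Chars.startswith l.toList [' ', ' ', '-', ' '] = true
            · -- "  - " line inside the block: both append pvPathOf l to files_modified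
              rw [List.foldl_cons]
              have hstep : pvStepA (fm, op, true) l = (fm ++ [pvPathOf l], op, true) := by
                simp [pvStepA, hfm', hdash]
              rw [hstep, (ih ls hlen (fm ++ [pvPathOf l]) op).2]
              conv_rhs => rw [pvBlock]
              rw [if_pos (by simpa using hdash)]
            · have hdash' : PySem.Chars.startswith l.toList [' ', ' ', '-', ' '] = false := by
                revert hdash; cases PySem.Chars.startswith l.toList [' ', ' ', '-', ' '] <;> simp
              rw [List.foldl_cons]
              have hstep : pvStepA (fm, op, true) l =
                  (fm, op ++ [pvValueOf (PySem.Str.strip l)], false) := by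
                simp [pvStepA, hfm', hdash', hp]
              rw [hstep, (ih ls hlen fm _).1]
              conv_rhs => rw [pvBlock]
              rw [if_neg (by simp [hdash'])]
              conv_rhs => rw [pvLoopFM]
              rw [if_neg (by simp [hfm'])]
              simp [pvAltPaths, hp]
        · have hp' : PySem.Chars.startswith (PySem.Chars.strip l.toList)
              ['p', 'a', 't', 'h', ':'] = false := by
            revert hp; cases PySem.Chars.startswith (PySem.Chars.strip l.toList)
              ['p', 'a', 't', 'h', ':'] <;> simp
          constructor
          · rw [List.foldl_cons]
            have hstep : pvStepA (fm, op, false) l = (fm, op, false) := by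
              simp [pvStepA, hfm', hp']
            rw [hstep, (ih ls hlen fm op).1]
            conv_rhs => rw [pvLoopFM]
            rw [if_neg (by simp [hfm'])]
            simp [pvAltPaths, hp']
          · by_cases hdash : PySem.Chars.startswith l.toList [' ', ' ', '-', ' '] = true
            · rw [List.foldl_cons]
              have hstep : pvStepA (fm, op, true) l = (fm ++ [pvPathOf l], op, true) := by
                simp [pvStepA, hfm', hdash]
              rw [hstep, (ih ls hlen (fm ++ [pvPathOf l]) op).2]
              conv_rhs => rw [pvBlock]
              rw [if_pos (by simpa using hdash)]
            · have hdash' : PySem.Chars.startswith l.toList [' ', ' ', '-', ' '] = false := by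
                revert hdash; cases PySem.Chars.startswith l.toList [' ', ' ', '-', ' '] <;> simp
              rw [List.foldl_cons]
              have hstep : pvStepA (fm, op, true) l = (fm, op, false) := by
                simp [pvStepA, hfm', hdash', hp']
              rw [hstep, (ih ls hlen fm op).1]
              conv_rhs => rw [pvBlock]
              rw [if_neg (by simp [hdash'])]
              conv_rhs => rw [pvLoopFM]
              rw [if_neg (by simp [hfm'])]
              simp [pvAltPaths, hp']

-- ===== VERDICT (by name: the statement is the Claim_ definition above) =====
theorem extract_paths_spec : Claim_equal_extract_paths := by
  intro plan_text _
  unfold Spec_extract_paths extract_paths extract_paths_alt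
  exact Prod.ext_iff.mpr (by
    have h := (pvMain (PySem.Str.splitlines plan_text).length _ le_rfl [] []).1
    simp only [pvProj, Prod.mk.injEq] at h
    exact ⟨h.1, h.2⟩)
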